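-- pv_equiv track=rewrite | github.com/faizalrf/svc | scylla/aws/ansible_install/generate_monitoring_config.py | generate_monitoring_yaml
-- ===== SOURCE A (Python) =====
-- def generate_monitoring_yaml(instances_info, cluster_name):
--     monitoring_config = []
--
--     # Group instances by region
--     grouped_by_region = {}
--     for info in instances_info:
--         region = info['region']
--         if region not in grouped_by_region:
--             grouped_by_region[region] = []
--         grouped_by_region[region].append(info['private_ip'])
--
--     return grouped_by_region
-- ===== SOURCE B (Python) =====
-- def generate_monitoring_yaml(instances_info, cluster_name):
--     # Two-pass decomposition: first the distinct regions in encounter order,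
--     # then one comprehension scan per region collecting its private IPs.
--     regions = list(dict.fromkeys(info['region'] for info in instances_info))
--     return {r: [info['private_ip'] for info in instances_info if info['region'] == r]
--             for r in regions}
-- ===== Notes on version B (the rewrite author's own statement) =====
-- stated objective: alternative
-- what changed: Replaces the single-pass hash accumulation with a two-pass decomposition: dedup the regions in encounter order, then one filtering scan per region collecting its private IPs.
import Mathlib
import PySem

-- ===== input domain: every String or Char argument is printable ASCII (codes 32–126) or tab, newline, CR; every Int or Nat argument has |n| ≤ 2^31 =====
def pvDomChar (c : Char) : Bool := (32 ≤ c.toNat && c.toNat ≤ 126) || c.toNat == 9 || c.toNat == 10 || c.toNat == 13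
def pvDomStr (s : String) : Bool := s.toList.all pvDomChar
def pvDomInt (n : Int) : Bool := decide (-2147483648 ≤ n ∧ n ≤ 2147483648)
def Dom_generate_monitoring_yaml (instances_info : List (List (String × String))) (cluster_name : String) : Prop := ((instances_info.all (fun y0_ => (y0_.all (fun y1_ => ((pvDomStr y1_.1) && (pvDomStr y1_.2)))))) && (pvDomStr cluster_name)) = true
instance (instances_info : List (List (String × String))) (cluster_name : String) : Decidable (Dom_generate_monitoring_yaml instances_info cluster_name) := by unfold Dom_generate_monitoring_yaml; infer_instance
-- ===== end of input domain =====

-- Header: B replaces A's one-pass hash accumulation by a two-pass decomposition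
-- (ordered dedup of regions, then one filtering scan per region); same return value.

-- ===== PORT A =====
-- first-match lookup info[k] (Python dict access); Pre_ guarantees the key is present
def pvLookup (info : List (String × String)) (k : String) : String :=
  ((PySem.Dict.mk info).get? k).getD ""

def generate_monitoring_yaml (instances_info : List (List (String × String))) (cluster_name : String) : List (String × List String) :=
  (instances_info.foldl
    (fun g info =>
      let region := pvLookup info "region"
      let g := if g.contains region then g else g.insert region ([] : List String)
      g.modify region [] (fun l => l ++ [pvLookup info "private_ip"]))
    PySem.Dict.empty).items

-- ===== PORT B =====
def generate_monitoring_yaml_alt (instances_info : List (List (String × String))) (cluster_name : String) : List (String × List String) :=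
  let regions := PySem.List.dedup (instances_info.map (fun info => pvLookup info "region"))
  regions.map (fun r =>
    (r, (instances_info.filter (fun info => pvLookup info "region" == r)).map
          (fun info => pvLookup info "private_ip")))

-- ===== PRECONDITION & SPEC =====
-- Pre_ excludes exactly the inputs where A raises KeyError: an instance dict missing
-- the 'region' or 'private_ip' key (B raises there too).
def Pre_generate_monitoring_yaml (instances_info : List (List (String × String))) (cluster_name : String) : Prop :=
  ∀ info ∈ instances_info, "region" ∈ info.map Prod.fst ∧ "private_ip" ∈ info.map Prod.fst
instance (instances_info : List (List (String × String))) (cluster_name : String) : Decidable (Pre_generate_monitoring_yaml instances_info cluster_name) := by unfold Pre_generate_monitoring_yaml; infer_instance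

def pvWitness_generate_monitoring_yaml : (List (List (String × String))) × String :=
  ([[("region", "us-east-1"), ("private_ip", "10.0.0.1")],
    [("region", "eu-west-1"), ("private_ip", "10.0.0.2")],
    [("region", "us-east-1"), ("private_ip", "10.0.0.3")]], "c1")

def Spec_generate_monitoring_yaml (instances_info : List (List (String × String))) (cluster_name : String) (out : List (String × List String)) : Prop := out = generate_monitoring_yaml_alt instances_info cluster_name
instance (instances_info : List (List (String × String))) (cluster_name : String) (out : List (String × List String)) : Decidable (Spec_generate_monitoring_yaml instances_info cluster_name out) := by unfold Spec_generate_monitoring_yaml; infer_instance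

-- ===== CLAIM (what is proved, stated in full; the proofs are below) =====
def Claim_equal_generate_monitoring_yaml : Prop := ∀ (instances_info : List (List (String × String))) (cluster_name : String), Dom_generate_monitoring_yaml instances_info cluster_name → Pre_generate_monitoring_yaml instances_info cluster_name → Spec_generate_monitoring_yaml instances_info cluster_name (generate_monitoring_yaml instances_info cluster_name)

-- ===== LEMMAS AND PROOFS =====

-- A's loop body ('insert [] if absent, then append') is a single modify-append step.
theorem step_eq_modify (g : PySem.Dict String (List String)) (r ip : String) :
    (if g.contains r then g else g.insert r ([] : List String)).modify r []
        (fun l => l ++ [ip])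
      = g.modify r [] (fun l => l ++ [ip]) := by
  by_cases h : g.contains r = true
  · simp [h]
  · simp only [Bool.not_eq_true] at h
    simp only [h, Bool.false_eq_true, if_false, PySem.Dict.modify,
      PySem.Dict.getD_insert_self, PySem.Dict.insert_insert_self]
    rw [PySem.Dict.getD_of_not_contains (h := h)]

theorem foldA_eq (instances_info : List (List (String × String))) :
    instances_info.foldl
      (fun g info =>
        (if g.contains (pvLookup info "region") then g
         else g.insert (pvLookup info "region") ([] : List String)).modify
          (pvLookup info "region") [] (fun l => l ++ [pvLookup info "private_ip"]))
      PySem.Dict.empty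
    = (instances_info.map (fun info => (pvLookup info "region", pvLookup info "private_ip"))).foldl
        (fun d p => d.modify p.1 [] (fun l => l ++ [p.2])) PySem.Dict.empty := by
  rw [List.foldl_map]
  exact List.foldl_ext _ _ _ (fun g info _ => step_eq_modify g _ _)

-- ===== VERDICT (by name: the statement is the Claim_ definition above) =====
theorem generate_monitoring_yaml_spec : Claim_equal_generate_monitoring_yaml := by
  intro instances_info cluster_name _ _
  unfold Spec_generate_monitoring_yaml generate_monitoring_yaml generate_monitoring_yaml_alt
  simp only [foldA_eq]
  set l := instances_info.map (fun info => (pvLookup info "region", pvLookup info "private_ip"))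
    with hl
  set d := l.foldl (fun d p => d.modify p.1 [] (fun l => l ++ [p.2])) PySem.Dict.empty with hd
  have hnd : d.keys.Nodup := by
    rw [hd]
    exact PySem.Dict.nodup_keys_foldl_modify_key l Prod.fst [] _ _ PySem.Dict.nodup_keys_empty
  have hkeys : d.keys = PySem.List.dedup (instances_info.map (fun info => pvLookup info "region")) := by
    rw [hd, PySem.Dict.keys_foldl_modify_key, PySem.Dict.keys_empty,
      PySem.Set.update_nil_left, hl, List.map_map]
    rfl
  rw [PySem.Dict.items_eq_map_keys d hnd [], hkeys]
  apply List.map_congr_left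
  intro r _
  have : d.getD r [] = (l.filter (fun p => p.1 == r)).map Prod.snd := by
    rw [hd, PySem.Dict.getD_foldl_modify_append, PySem.Dict.getD_empty]
    simp
  rw [this, hl, List.filter_map, List.map_map]
  rfl
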